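-- pv_equiv track=rewrite | github.com/diwert-ai/Problems | Problems/Checkio/Simple/mathematically lucky tickets.py | gen_ordered_permutations
-- ===== SOURCE A (Python) =====
-- def gen_ordered_permutations(l1:list,l2:list,m:int,prefix=None):
--     """генератор перестановок элементов из двух списков l1 и l2,
--        сохраняющих порядок следования элементов в этих списках:
--        l1=[1,2,3] l2=['+','-'] -> [1,2,'+',3,'-']; ['+',1,2,'-',3] и тд
--        m - глубина рекурсии = len(l1)+len(l2)
--        prefix - возвращаемая перестановка
--     """
--     prefix = prefix or []
--     if m == 0:
--         yield prefix
--     if len(l1) > 0: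
--         yield from gen_ordered_permutations(l1[1:],l2,m-1,prefix+[l1[0]])
--     if len(l2) > 0:
--         yield from gen_ordered_permutations(l1,l2[1:],m-1,prefix+[l2[0]])
-- ===== SOURCE B (Python) =====
-- def gen_ordered_permutations(l1: list, l2: list, m: int, prefix=None):
--     """Iterative version: explicit stack of (l1, l2, m, prefix) frames,
--        pushed so the l1-branch is always processed first (DFS preorder)."""
--     stack = [(l1, l2, m, prefix or [])]
--     while stack:
--         a, b, k, p = stack.pop()
--         if k == 0:
--             yield p
--         if len(b) > 0:
--             stack.append((a, b[1:], k - 1, p + [b[0]]))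
--         if len(a) > 0:
--             stack.append((a[1:], b, k - 1, p + [a[0]]))
-- ===== Notes on version B (the rewrite author's own statement) =====
-- stated objective: alternative
-- what changed: Replaces A's recursive generator (yield from on two recursive calls) with an iterative depth-first loop over an explicit stack of (l1, l2, m, prefix) frames, pushing the l2-branch before the l1-branch so yields come in the same preorder.
import Mathlib
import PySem

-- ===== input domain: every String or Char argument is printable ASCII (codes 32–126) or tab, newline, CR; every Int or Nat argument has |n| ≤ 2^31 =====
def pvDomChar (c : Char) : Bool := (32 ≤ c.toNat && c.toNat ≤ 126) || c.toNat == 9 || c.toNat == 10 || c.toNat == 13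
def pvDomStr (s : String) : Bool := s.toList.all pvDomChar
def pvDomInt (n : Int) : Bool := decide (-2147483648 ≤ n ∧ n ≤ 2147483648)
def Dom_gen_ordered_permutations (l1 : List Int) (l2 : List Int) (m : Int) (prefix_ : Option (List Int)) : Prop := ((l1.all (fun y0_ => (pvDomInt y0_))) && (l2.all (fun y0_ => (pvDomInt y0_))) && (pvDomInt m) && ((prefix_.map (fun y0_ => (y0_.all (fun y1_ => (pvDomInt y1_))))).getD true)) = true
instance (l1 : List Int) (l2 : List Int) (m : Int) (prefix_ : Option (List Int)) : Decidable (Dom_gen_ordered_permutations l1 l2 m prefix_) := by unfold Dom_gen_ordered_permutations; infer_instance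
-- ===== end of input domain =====

-- B replaces A's recursive generator with an iterative loop over an explicit stack of
-- (l1, l2, m, prefix) frames (objective 'alternative': same cost, same yields in order).
-- Both Pythons are generators; equivalence is about the list of yielded values.

-- ===== PORT A =====
-- A's recursive body, carrying the (already defaulted) prefix list; `prefix = prefix or []`
-- is the identity on list values (an empty list maps to []), so the recursive calls
-- (which always receive a list) pass p through unchanged
def genOP_A (l1 l2 : List Int) (m : Int) (p : List Int) : List (List Int) :=
  (if m = 0 then [p] else []) ++                          -- if m == 0: yield prefix
  (match l1 with                                          -- if len(l1) > 0: yield from …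
   | [] => []
   | a :: t => genOP_A t l2 (m - 1) (p ++ [a])) ++
  (match l2 with                                          -- if len(l2) > 0: yield from …
   | [] => []
   | b :: t => genOP_A l1 t (m - 1) (p ++ [b]))
termination_by l1.length + l2.length
decreasing_by all_goals simp_all

def gen_ordered_permutations (l1 : List Int) (l2 : List Int) (m : Int) (prefix_ : Option (List Int)) : List (List Int) :=
  -- prefix = prefix or []  (None defaults to []; an empty list also maps to [], the same value)
  genOP_A l1 l2 m (match prefix_ with | none => [] | some p => p)

-- ===== PORT B =====
-- a stack frame is (l1, l2, m, prefix); frame/stack weight = termination measure of the loop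
def pvFrameW (f : List Int × List Int × Int × List Int) : Nat :=
  3 ^ (f.1.length + f.2.1.length)
def pvStackW (fs : List (List Int × List Int × Int × List Int)) : Nat :=
  (fs.map pvFrameW).sum

-- termination facts cited by genOP_B's decreasing_by
theorem pvPowLt (e1 e2 S : Nat) (h : e1 < e2) : 3 ^ e1 + S < 3 ^ e2 + S := by
  have := Nat.pow_lt_pow_right (by norm_num : 1 < 3) h
  omega

theorem pvPow2Lt (t u S : Nat) :
    3 ^ (t + (u + 1)) + (3 ^ (t + 1 + u) + S) < 3 ^ (t + 1 + (u + 1)) + S := by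
  have h1 : t + (u + 1) = t + u + 1 := by omega
  have h2 : t + 1 + u = t + u + 1 := by omega
  have h3 : t + 1 + (u + 1) = t + u + 1 + 1 := by omega
  rw [h1, h2, h3, pow_succ]
  have := Nat.one_le_pow (t + u + 1) 3 (by norm_num)
  omega

-- the while-loop: pop a frame, yield its prefix if m == 0, then push the l2-branch
-- frame and then the l1-branch frame (so the l1 branch is popped first)
def genOP_B : List (List Int × List Int × Int × List Int) → List (List Int) → List (List Int)
  | [], acc => acc.reverse
  | (a, b, k, p) :: rest, acc =>
      genOP_B
        ((match a with | [] => [] | x :: t => [(t, b, k - 1, p ++ [x])]) ++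
         (match b with | [] => [] | y :: t => [(a, t, k - 1, p ++ [y])]) ++
         rest)
        (if k = 0 then p :: acc else acc)
termination_by fs _ => pvStackW fs
decreasing_by
  rcases a with _ | ⟨x, t⟩ <;> rcases b with _ | ⟨y, u⟩ <;>
    simp only [pvStackW, pvFrameW, List.map_cons, List.sum_cons, List.cons_append,
      List.nil_append, List.length_cons, List.length_nil]
  · simp
  · exact pvPowLt _ _ _ (by omega)
  · exact pvPowLt _ _ _ (by omega)
  · exact pvPow2Lt _ _ _

def gen_ordered_permutations_alt (l1 : List Int) (l2 : List Int) (m : Int) (prefix_ : Option (List Int)) : List (List Int) :=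
  -- stack = [(l1, l2, m, prefix or [])]; then the loop
  genOP_B [(l1, l2, m, (match prefix_ with | none => [] | some p => p))] []

-- ===== PRECONDITION & SPEC =====
def Spec_gen_ordered_permutations (l1 : List Int) (l2 : List Int) (m : Int) (prefix_ : Option (List Int)) (out : List (List Int)) : Prop := out = gen_ordered_permutations_alt l1 l2 m prefix_
instance (l1 : List Int) (l2 : List Int) (m : Int) (prefix_ : Option (List Int)) (out : List (List Int)) : Decidable (Spec_gen_ordered_permutations l1 l2 m prefix_ out) := by unfold Spec_gen_ordered_permutations; infer_instance

-- ===== CLAIM (what is proved, stated in full; the proofs are below) =====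
def Claim_equal_gen_ordered_permutations : Prop := ∀ (l1 : List Int) (l2 : List Int) (m : Int) (prefix_ : Option (List Int)), Dom_gen_ordered_permutations l1 l2 m prefix_ → Spec_gen_ordered_permutations l1 l2 m prefix_ (gen_ordered_permutations l1 l2 m prefix_)

-- ===== LEMMAS AND PROOFS =====

-- loop invariant: the stack loop emits, after the accumulator, the recursive outputs
-- of all frames on the stack, in stack (top-first) order
theorem genOP_B_flat (fs : List (List Int × List Int × Int × List Int))
    (acc : List (List Int)) :
    genOP_B fs acc =
      acc.reverse ++ fs.flatMap (fun f => genOP_A f.1 f.2.1 f.2.2.1 f.2.2.2) := by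
  induction fs, acc using genOP_B.induct with
  | case1 acc => simp [genOP_B]
  | case2 a b k p rest acc ih =>
      rw [genOP_B.eq_def]
      simp only []
      by_cases hk : k = 0 <;>
        simp only [hk, if_true, if_false, dite_true, dite_false] at ih ⊢ <;>
      rw [ih, List.flatMap_cons, genOP_A.eq_def] <;>
      rcases a with _ | ⟨x, t⟩ <;> rcases b with _ | ⟨y, u⟩ <;>
        simp [hk, List.append_assoc]

-- ===== VERDICT (by name: the statement is the Claim_ definition above) =====
theorem gen_ordered_permutations_spec : Claim_equal_gen_ordered_permutations := by
  intro l1 l2 m prefix_ _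
  unfold Spec_gen_ordered_permutations gen_ordered_permutations gen_ordered_permutations_alt
  rw [genOP_B_flat]
  simp
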